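-- pv_equiv track=rewrite | github.com/stablemaverick/tape-film-ichoose | app/rules/harmonization_rules.py | pick_best_director
-- ===== SOURCE A (Python) =====
-- from typing import Any, Dict, List, Optional
--
-- def _clean(value: Any) -> Optional[str]:
--     if value is None:
--         return None
--     text = str(value).strip()
--     return text if text else None
--
-- def _supplier_map(group: List[Dict[str, Any]]) -> Dict[str, Dict[str, Any]]:
--     return {(_clean(r.get("supplier")) or "").lower(): r for r in group}
--
-- def pick_best_director(group: List[Dict[str, Any]]) -> Optional[str]:
--     """Moovies director wins if present, else Lasgo, else any."""
--     by = _supplier_map(group)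
--     moovies = by.get("moovies")
--     if moovies and _clean(moovies.get("director")):
--         return _clean(moovies["director"])
--     lasgo = by.get("lasgo")
--     if lasgo and _clean(lasgo.get("director")):
--         return _clean(lasgo["director"])
--     for row in group:
--         d = _clean(row.get("director"))
--         if d:
--             return d
--     return None
-- ===== SOURCE B (Python) =====
-- from typing import Any, Dict, List, Optional
--
-- def _clean(value: Any) -> Optional[str]:
--     if value is None:
--         return None
--     text = str(value).strip()
--     return text if text else None
--
-- def pick_best_director(group: List[Dict[str, Any]]) -> Optional[str]:
--     """Moovies director wins if present, else Lasgo, else any (single pass)."""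
--     last_moovies = None
--     last_lasgo = None
--     first_director = None
--     for row in group:
--         s = (_clean(row.get("supplier")) or "").lower()
--         if s == "moovies":
--             last_moovies = row
--         elif s == "lasgo":
--             last_lasgo = row
--         if first_director is None:
--             first_director = _clean(row.get("director"))
--     if last_moovies is not None:
--         d = _clean(last_moovies.get("director"))
--         if d:
--             return d
--     if last_lasgo is not None:
--         d = _clean(last_lasgo.get("director"))
--         if d:
--             return d
--     return first_director
-- ===== Notes on version B (the rewrite author's own statement) =====
-- stated objective: simpler
-- what changed: Replaced the intermediate supplier-to-row dict comprehension plus two lookups and a second scan with one single pass over group that keeps the last 'moovies' row, the last 'lasgo' row and the first clean director.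
import Mathlib
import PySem

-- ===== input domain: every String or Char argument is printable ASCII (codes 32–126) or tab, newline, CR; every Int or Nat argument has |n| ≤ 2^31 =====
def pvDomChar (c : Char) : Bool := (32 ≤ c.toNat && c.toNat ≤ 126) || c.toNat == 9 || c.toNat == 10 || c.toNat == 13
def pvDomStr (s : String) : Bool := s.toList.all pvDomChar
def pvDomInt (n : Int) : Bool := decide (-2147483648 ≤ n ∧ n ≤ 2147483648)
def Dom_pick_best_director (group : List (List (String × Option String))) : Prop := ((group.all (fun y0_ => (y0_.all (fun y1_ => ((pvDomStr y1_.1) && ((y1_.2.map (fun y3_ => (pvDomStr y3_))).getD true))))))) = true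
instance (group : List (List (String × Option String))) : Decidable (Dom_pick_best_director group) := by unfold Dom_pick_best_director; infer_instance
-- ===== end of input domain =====

-- B is a single pass keeping the last 'moovies'/'lasgo' rows and the first clean director,
-- instead of A's intermediate supplier→row dict; return value only (neither mutates).

-- shared helpers (the Python module's _clean, and dict.get on an association-list row)
def pvClean (v : Option String) : Option String :=
  match v with
  | none => none
  | some s => let t := PySem.Str.strip s; if t = "" then none else some t

def pvGet (row : List (String × Option String)) (k : String) : Option String :=
  ((row.find? (fun p => p.1 == k)).map Prod.snd).join

-- (_clean(r.get("supplier")) or "").lower() — the key used identically by both Pythons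
def pvKey (r : List (String × Option String)) : String :=
  PySem.Str.lower ((pvClean (pvGet r "supplier")).getD "")

-- ===== PORT A =====
-- A's final 'for row in group: …' scan
def pvScanA : List (List (String × Option String)) → Option String
  | [] => none
  | r :: rest =>
    match pvClean (pvGet r "director") with
    | some d => some d
    | none => pvScanA rest

-- moovies["director"] (indexing) is only reached when the guard proved the key present,
-- so pvGet computes the same value there.
def pick_best_director (group : List (List (String × Option String))) : Option String :=
  let by_ := group.foldl (fun d r => d.insert (pvKey r) r) PySem.Dict.empty
  let tryM : Option String :=
    match by_.get? "moovies" with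
    | some m => if m ≠ [] then pvClean (pvGet m "director") else none
    | none => none
  match tryM with
  | some d => some d
  | none =>
    let tryL : Option String :=
      match by_.get? "lasgo" with
      | some l => if l ≠ [] then pvClean (pvGet l "director") else none
      | none => none
    match tryL with
    | some d => some d
    | none => pvScanA group

-- ===== PORT B =====
def pvStepB (st : Option (List (String × Option String)) × Option (List (String × Option String)) × Option String)
    (r : List (String × Option String)) :
    Option (List (String × Option String)) × Option (List (String × Option String)) × Option String :=
  let s := pvKey r
  let st1 := if s = "moovies" then (some r, st.2.1, st.2.2)
             else if s = "lasgo" then (st.1, some r, st.2.2)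
             else st
  (st1.1, st1.2.1, match st1.2.2 with | some d => some d | none => pvClean (pvGet r "director"))

def pick_best_director_alt (group : List (List (String × Option String))) : Option String :=
  let st := group.foldl pvStepB (none, none, none)
  let dm : Option String :=
    match st.1 with
    | some m => pvClean (pvGet m "director")
    | none => none
  match dm with
  | some d => some d
  | none =>
    let dl : Option String :=
      match st.2.1 with
      | some l => pvClean (pvGet l "director")
      | none => none
    match dl with
    | some d => some d
    | none => st.2.2

-- ===== PRECONDITION & SPEC =====
def Spec_pick_best_director (group : List (List (String × Option String))) (out : Option String) : Prop := out = pick_best_director_alt group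
instance (group : List (List (String × Option String))) (out : Option String) : Decidable (Spec_pick_best_director group out) := by unfold Spec_pick_best_director; infer_instance

-- ===== CLAIM (what is proved, stated in full; the proofs are below) =====
def Claim_equal_pick_best_director : Prop := ∀ (group : List (List (String × Option String))), Dom_pick_best_director group → Spec_pick_best_director group (pick_best_director group)

-- ===== LEMMAS AND PROOFS =====

-- A's dict build: lookup = last row in group whose key matches, else the initial dict's answer
theorem pvDictFold (group : List (List (String × Option String)))
    (d : PySem.Dict String (List (String × Option String))) (k : String) :
    (group.foldl (fun d r => d.insert (pvKey r) r) d).get? k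
      = ((group.reverse.find? (fun r => pvKey r == k)).orElse (fun _ => d.get? k)) := by
  induction group generalizing d with
  | nil => simp
  | cons r t ih =>
    simp only [List.foldl_cons, List.reverse_cons, List.find?_append, ih]
    cases h : t.reverse.find? (fun r => pvKey r == k) with
    | some v => simp [Option.orElse]
    | none =>
      simp only [Option.orElse, List.find?]
      by_cases hk : pvKey r == k
      · have hkk : k = pvKey r := (beq_iff_eq.mp hk).symm
        subst hkk
        simp [PySem.Dict.get?_insert_self]
      · have hne : k ≠ pvKey r := fun h => hk (beq_iff_eq.mpr h.symm)
        simp [hk, PySem.Dict.get?_insert_of_ne d r hne]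

-- B's fold: last moovies row, last lasgo row, first clean director (generalized over the start state)
theorem pvFoldB (group : List (List (String × Option String)))
    (st : Option (List (String × Option String)) × Option (List (String × Option String)) × Option String) :
    group.foldl pvStepB st
      = ((group.reverse.find? (fun r => pvKey r == "moovies")).orElse (fun _ => st.1),
         (group.reverse.find? (fun r => pvKey r == "lasgo")).orElse (fun _ => st.2.1),
         st.2.2.orElse (fun _ => pvScanA group)) := by
  induction group generalizing st with
  | nil => obtain ⟨lm, ll, fd⟩ := st; cases fd <;> simp [pvScanA, Option.orElse]
  | cons r t ih =>
    obtain ⟨lm, ll, fd⟩ := st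
    rw [List.foldl_cons, ih]
    simp only [List.reverse_cons, List.find?_append, List.find?, pvStepB, pvScanA]
    cases h1 : pvKey r == "moovies" <;> cases h2 : pvKey r == "lasgo" <;>
      cases fd <;> cases hd : pvClean (pvGet r "director") <;>
      cases hm : t.reverse.find? (fun r => pvKey r == "moovies") <;>
      cases hl : t.reverse.find? (fun r => pvKey r == "lasgo") <;>
      simp_all [Option.orElse, beq_iff_eq]

-- an empty row never carries the key "moovies" or "lasgo"
theorem pvKey_nil : pvKey [] = "" := by decide

theorem pick_best_director_spec : Claim_equal_pick_best_director := by
  intro group _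
  unfold Spec_pick_best_director pick_best_director pick_best_director_alt
  simp only [pvDictFold, pvFoldB, PySem.Dict.get?_empty]
  cases hm : group.reverse.find? (fun r => pvKey r == "moovies") with
  | none =>
    cases hl : group.reverse.find? (fun r => pvKey r == "lasgo") with
    | none => simp [Option.orElse]
    | some l =>
      have hlk : pvKey l = "lasgo" := beq_iff_eq.mp (List.find?_some (p := fun r => pvKey r == "lasgo") hl)
      have hne : l ≠ [] := by intro h; rw [h, pvKey_nil] at hlk; exact absurd hlk (by decide)
      simp [Option.orElse, hne]
  | some m =>
    have hmk : pvKey m = "moovies" := beq_iff_eq.mp (List.find?_some (p := fun r => pvKey r == "moovies") hm)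
    have hne : m ≠ [] := by intro h; rw [h, pvKey_nil] at hmk; exact absurd hmk (by decide)
    cases hd : pvClean (pvGet m "director") with
    | some d => simp [Option.orElse, hne, hd]
    | none =>
      cases hl : group.reverse.find? (fun r => pvKey r == "lasgo") with
      | none => simp [Option.orElse, hne, hd]
      | some l =>
        have hlk : pvKey l = "lasgo" := beq_iff_eq.mp (List.find?_some (p := fun r => pvKey r == "lasgo") hl)
        have hnel : l ≠ [] := by intro h; rw [h, pvKey_nil] at hlk; exact absurd hlk (by decide)
        simp [Option.orElse, hne, hd, hnel]
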